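-- pv_equiv track=rewrite | github.com/joshanashakya/dissertation | workspace/dataset/java-python/GeeksForGeeks/2853/A/2.py | solveEven
-- ===== SOURCE A (Python) =====
-- def solveEven(s):
--
--     # If length is odd then return 2
--     if len(s) % 2 == 1:
--         return 2
--
--     # To check if half of palindromic
--     # string is itself a palindrome
--     ls = s[0 : len(s) // 2]
--     rs = s[len(s) // 2 : len(s)]
--
--     # If not then return 1
--     if ls != rs:
--         return 1
--
--     # Else call function with
--     # half palindromic string
--     return solveEven(ls)
-- ===== SOURCE B (Python) =====
-- def solveEven(s):
--     # Closed-form check: strip the factor 2**k from len(s); the recursion in A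
--     # returns 2 exactly when s is its odd-length prefix repeated 2**k times.
--     n = len(s)
--     k = 0
--     while n % 2 == 0 and n > 0:
--         n //= 2
--         k += 1
--     return 2 if s == s[:n] * (2 ** k) else 1
-- ===== Notes on version B (the rewrite author's own statement) =====
-- stated objective: simpler
-- what changed: Replaces the recursive halve-and-compare with a single closed-form test: compute the 2-adic valuation k of len(s) and return 2 iff s equals its prefix of odd length len(s)//2**k repeated 2**k times.
import Mathlib
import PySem

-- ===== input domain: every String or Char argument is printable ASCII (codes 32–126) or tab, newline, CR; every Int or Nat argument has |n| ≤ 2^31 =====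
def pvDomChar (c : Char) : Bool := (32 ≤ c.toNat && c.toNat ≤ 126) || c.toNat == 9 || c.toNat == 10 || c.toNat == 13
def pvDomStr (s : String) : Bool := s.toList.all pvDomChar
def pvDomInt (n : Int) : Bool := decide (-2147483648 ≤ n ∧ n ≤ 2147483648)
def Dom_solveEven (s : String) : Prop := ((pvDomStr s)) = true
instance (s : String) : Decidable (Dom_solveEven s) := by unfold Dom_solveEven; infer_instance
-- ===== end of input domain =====

-- B replaces A's recursive halve-and-compare by a single closed-form repetition test (simpler; same O(n) cost).

-- ===== PORT A =====
-- Literal port of A's recursion; the fuel argument (length+1, enough for every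
-- nonempty string) only makes the recursion total — on the empty string, which
-- Pre_ excludes, Python A raises RecursionError.
def solveEvenGo : Nat → List Char → Int
  | 0, _ => 0
  | fuel+1, l =>
    if l.length % 2 = 1 then 2
    else
      let h := PySem.Int.floordiv (l.length : Int) 2
      let ls := PySem.List.slice l (some 0) (some h)
      let rs := PySem.List.slice l (some h) (some (l.length : Int))
      if ls ≠ rs then 1 else solveEvenGo fuel ls

def solveEven (s : String) : Int := solveEvenGo (s.toList.length + 1) s.toList

-- ===== PORT B =====
-- while n % 2 == 0 and n > 0: n //= 2; k += 1
def oddPart (n k : Nat) : Nat × Nat :=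
  if h : n % 2 = 0 ∧ 0 < n then oddPart (n / 2) (k + 1) else (n, k)
termination_by n
decreasing_by exact Nat.div_lt_self h.2 (by omega)

-- return 2 if s == s[:n] * (2 ** k) else 1   (string repetition = flatten ∘ replicate)
def solveEvenAltList (l : List Char) : Int :=
  let mk := oddPart l.length 0
  if l = (List.replicate (2 ^ mk.2) (l.take mk.1)).flatten then 2 else 1

def solveEven_alt (s : String) : Int := solveEvenAltList s.toList

-- ===== PRECONDITION & SPEC =====
-- Pre_ excludes only the empty string, on which Python A raises RecursionError.
def Pre_solveEven (s : String) : Prop := s.toList ≠ []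
instance (s : String) : Decidable (Pre_solveEven s) := by unfold Pre_solveEven; infer_instance
def pvWitness_solveEven : String := "ab"

def Spec_solveEven (s : String) (out : Int) : Prop := out = solveEven_alt s
instance (s : String) (out : Int) : Decidable (Spec_solveEven s out) := by unfold Spec_solveEven; infer_instance

-- ===== CLAIM (what is proved, stated in full; the proofs are below) =====
def Claim_equal_solveEven : Prop := ∀ (s : String), Dom_solveEven s → Pre_solveEven s → Spec_solveEven s (solveEven s)
-- ===== LEMMAS AND PROOFS =====

lemma oddPart_shift : ∀ (n k : Nat), oddPart n k = ((oddPart n 0).1, k + (oddPart n 0).2) := by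
  intro n
  induction n using Nat.strong_induction_on with
  | _ n ih =>
    intro k
    by_cases h : n % 2 = 0 ∧ 0 < n
    · rw [oddPart, dif_pos h, ih (n / 2) (Nat.div_lt_self h.2 (by omega)) (k + 1)]
      conv_rhs => rw [oddPart, dif_pos h, ih (n / 2) (Nat.div_lt_self h.2 (by omega)) 1]
      simp [Nat.add_assoc]
    · rw [oddPart, dif_neg h]
      conv_rhs => rw [oddPart, dif_neg h]
      simp

lemma oddPart_fst_le : ∀ (n k : Nat), (oddPart n k).1 ≤ n := by
  intro n
  induction n using Nat.strong_induction_on with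
  | _ n ih =>
    intro k
    by_cases h : n % 2 = 0 ∧ 0 < n
    · rw [oddPart, dif_pos h]
      exact le_trans (ih (n / 2) (Nat.div_lt_self h.2 (by omega)) (k + 1)) (Nat.div_le_self n 2)
    · rw [oddPart, dif_neg h]

lemma oddPart_odd (n : Nat) (ho : n % 2 = 1) : oddPart n 0 = (n, 0) := by
  rw [oddPart, dif_neg (by omega)]

lemma oddPart_even (n : Nat) (h0 : 0 < n) (he : n % 2 = 0) :
    oddPart n 0 = ((oddPart (n / 2) 0).1, (oddPart (n / 2) 0).2 + 1) := by
  rw [oddPart, dif_pos ⟨he, h0⟩, oddPart_shift]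
  simp [Nat.add_comm]

lemma doubling_eq {α : Type} (a b : List α) : a ++ a = b ++ b ↔ a = b := by
  constructor
  · intro h
    have hl : a.length = b.length := by
      have := congrArg List.length h
      simp at this
      omega
    exact (List.append_inj h hl).1
  · intro h; rw [h]

lemma half_repeat_iff (a P : List Char) (j : Nat) :
    a ++ a = (List.replicate (2 ^ (j + 1)) P).flatten ↔ a = (List.replicate (2 ^ j) P).flatten := by
  rw [pow_succ, Nat.mul_two, List.replicate_add, List.flatten_append]
  exact doubling_eq _ _

lemma altList_double (a : List Char) (hne : a ≠ []) :
    solveEvenAltList (a ++ a) = solveEvenAltList a := by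
  have h0 : 0 < a.length := List.length_pos_of_ne_nil hne
  have hlen : (a ++ a).length = a.length + a.length := by simp
  have hdiv : (a ++ a).length / 2 = a.length := by omega
  have hop : oddPart (a ++ a).length 0 = ((oddPart a.length 0).1, (oddPart a.length 0).2 + 1) := by
    rw [oddPart_even _ (by omega) (by omega), hdiv]
  have hmle : (oddPart a.length 0).1 ≤ a.length := oddPart_fst_le a.length 0
  have htake : (a ++ a).take (oddPart a.length 0).1 = a.take (oddPart a.length 0).1 :=
    List.take_append_of_le_length hmle
  simp only [solveEvenAltList, hop, htake]
  have hiff := half_repeat_iff a (a.take (oddPart a.length 0).1) (oddPart a.length 0).2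
  by_cases hc : a = (List.replicate (2 ^ (oddPart a.length 0).2) (a.take (oddPart a.length 0).1)).flatten
  · rw [if_pos (hiff.mpr hc), if_pos hc]
  · rw [if_neg (fun h => hc (hiff.mp h)), if_neg hc]

lemma go_eq : ∀ (fuel : Nat) (l : List Char), l ≠ [] → l.length < fuel →
    solveEvenGo fuel l = solveEvenAltList l := by
  intro fuel
  induction fuel with
  | zero => intro l _ h; omega
  | succ f ih =>
    intro l hne hlt
    have hn0 : 0 < l.length := List.length_pos_of_ne_nil hne
    have hfd : PySem.Int.floordiv (l.length : Int) 2 = ((l.length / 2 : Nat) : Int) := by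
      exact_mod_cast PySem.Int.floordiv_natCast l.length 2
    by_cases ho : l.length % 2 = 1
    · -- odd length: both return 2
      rw [solveEvenGo, if_pos ho]
      simp only [solveEvenAltList, oddPart_odd l.length ho]
      simp
    · have he : l.length % 2 = 0 := by omega
      have hn2 : 2 ≤ l.length := by omega
      have hls : PySem.List.slice l (some 0) (some (PySem.Int.floordiv (l.length : Int) 2))
          = l.take (l.length / 2) := by
        rw [hfd]
        simp only [PySem.List.slice_zero_start, PySem.List.slice_to_natCast]
      have hrs : PySem.List.slice l (some (PySem.Int.floordiv (l.length : Int) 2)) (some (l.length : Int))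
          = l.drop (l.length / 2) := by
        rw [hfd, PySem.List.slice_natCast]
        exact List.take_of_length_le (by simp)
      rw [solveEvenGo, if_neg (by omega)]
      simp only [hls, hrs]
      by_cases heq : l.take (l.length / 2) = l.drop (l.length / 2)
      · -- halves equal: recurse on the first half
        rw [if_neg (by simpa using heq)]
        have hlen2 : (l.take (l.length / 2)).length = l.length / 2 := by
          simp; omega
        have hne2 : l.take (l.length / 2) ≠ [] := by
          intro h
          rw [h] at hlen2
          simp at hlen2
          omega
        have hdecomp : l = l.take (l.length / 2) ++ l.take (l.length / 2) := by
          conv_lhs => rw [← List.take_append_drop (l.length / 2) l]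
          rw [heq]
        rw [ih (l.take (l.length / 2)) hne2 (by omega)]
        conv_rhs => rw [hdecomp]
        exact (altList_double _ hne2).symm
      · -- halves differ: both return 1
        rw [if_pos (by simpa using heq)]
        simp only [solveEvenAltList, oddPart_even l.length hn0 he]
        rw [if_neg]
        intro habs
        apply heq
        set X := (List.replicate (2 ^ (oddPart (l.length / 2) 0).2)
          (l.take (oddPart (l.length / 2) 0).1)).flatten with hX
        have habs2 : l = X ++ X := by
          rw [habs]
          rw [pow_succ, Nat.mul_two, List.replicate_add, List.flatten_append]
        have hXlen : X.length = l.length / 2 := by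
          have := congrArg List.length habs2
          simp at this
          omega
        have hhalf1 : l.take (l.length / 2) = X := by
          have h1 : l.take (l.length / 2) = (X ++ X).take X.length := by
            rw [hXlen, ← habs2]
          rw [h1, List.take_left]
        have hhalf2 : l.drop (l.length / 2) = X := by
          have h2 : l.drop (l.length / 2) = (X ++ X).drop X.length := by
            rw [hXlen, ← habs2]
          rw [h2, List.drop_left]
        rw [hhalf1, hhalf2]

theorem solveEven_spec : Claim_equal_solveEven := by
  intro s _ hpre
  unfold Spec_solveEven solveEven solveEven_alt
  exact go_eq (s.toList.length + 1) s.toList hpre (by omega)
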